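-- pv_equiv track=rewrite | github.com/owenps/KattisSolutions | doorman.py | doorman
-- ===== SOURCE A (Python) =====
-- def doorman(diff, queue, max_diff):
--    if abs(diff) > max_diff:
--       return -1
--    if not queue:
--       return 0
--
--    if len(queue) == 1 or queue[0] == queue[1]:
--       new_diff = diff - 1 if queue[0] == "W" else diff + 1
--       return 1 + doorman(new_diff, queue[1:], max_diff)
--    else: # MW or WM
--       return 2 + doorman(diff,queue[2:],max_diff)
-- ===== SOURCE B (Python) =====
-- def doorman(diff, queue, max_diff):
--     i, cur_diff, total, n = 0, diff, 0, len(queue)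
--     while True:
--         if abs(cur_diff) > max_diff:
--             return total - 1
--         if i >= n:
--             return total
--         if i == n - 1 or queue[i] == queue[i + 1]:
--             cur_diff += -1 if queue[i] == 'W' else 1
--             total += 1
--             i += 1
--         else:
--             total += 2
--             i += 2
-- ===== Notes on version B (the rewrite author's own statement) =====
-- stated objective: simpler
-- what changed: Replaced the recursion with per-call string slicing by a single iterative index loop carrying a running total, with the -1/0 terminals folded as total-1/total.
import Mathlib
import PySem

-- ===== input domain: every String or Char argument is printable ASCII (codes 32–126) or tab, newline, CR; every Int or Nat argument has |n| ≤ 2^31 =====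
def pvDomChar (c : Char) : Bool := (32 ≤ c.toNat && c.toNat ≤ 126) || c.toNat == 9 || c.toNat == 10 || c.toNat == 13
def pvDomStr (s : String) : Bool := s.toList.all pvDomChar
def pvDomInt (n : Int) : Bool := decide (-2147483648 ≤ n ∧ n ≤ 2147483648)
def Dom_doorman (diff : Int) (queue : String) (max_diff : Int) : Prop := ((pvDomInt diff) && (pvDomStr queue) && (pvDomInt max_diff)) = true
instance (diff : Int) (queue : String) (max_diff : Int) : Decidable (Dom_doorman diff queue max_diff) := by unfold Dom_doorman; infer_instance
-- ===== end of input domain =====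

-- B replaces A's slicing recursion by one iterative index loop with a running total (simpler: no per-call slices, terminals folded into the total).

-- ===== PORT A =====
-- A's recursion, step for step: bound check, empty check, then the
-- len==1 / equal-pair single step or the skip-two step, on queue.toList.
def doormanRec (diff : Int) (q : List Char) (max_diff : Int) : Int :=
  if |diff| > max_diff then -1
  else
    match q with
    | [] => 0
    | [c] =>
        let new_diff := if c = 'W' then diff - 1 else diff + 1
        1 + doormanRec new_diff [] max_diff
    | c :: d :: rest =>
        if c = d then
          let new_diff := if c = 'W' then diff - 1 else diff + 1
          1 + doormanRec new_diff (d :: rest) max_diff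
        else
          2 + doormanRec diff rest max_diff
termination_by q.length
decreasing_by all_goals simp

def doorman (diff : Int) (queue : String) (max_diff : Int) : Int :=
  doormanRec diff queue.toList max_diff

-- ===== PORT B =====
-- B's while-loop: index i, running cur_diff and total; terminals folded as total-1 / total.
def doormanAltGo (s : List Char) (max_diff : Int) (i : Nat) (cur_diff total : Int) : Int :=
  if |cur_diff| > max_diff then total - 1
  else if i ≥ s.length then total
  else if i = s.length - 1 ∨ s[i]! = s[i + 1]! then
    doormanAltGo s max_diff (i + 1)
      (cur_diff + (if s[i]! = 'W' then -1 else 1)) (total + 1)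
  else
    doormanAltGo s max_diff (i + 2) cur_diff (total + 2)
termination_by s.length - i
decreasing_by all_goals omega

def doorman_alt (diff : Int) (queue : String) (max_diff : Int) : Int :=
  doormanAltGo queue.toList max_diff 0 diff 0

-- ===== PRECONDITION & SPEC =====
def Spec_doorman (diff : Int) (queue : String) (max_diff : Int) (out : Int) : Prop := out = doorman_alt diff queue max_diff
instance (diff : Int) (queue : String) (max_diff : Int) (out : Int) : Decidable (Spec_doorman diff queue max_diff out) := by unfold Spec_doorman; infer_instance

-- ===== CLAIM (what is proved, stated in full; the proofs are below) =====
def Claim_equal_doorman : Prop := ∀ (diff : Int) (queue : String) (max_diff : Int), Dom_doorman diff queue max_diff → Spec_doorman diff queue max_diff (doorman diff queue max_diff)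

-- ===== LEMMAS AND PROOFS =====

-- Loop invariant: B's loop from index i equals total plus A's recursion on the suffix.
theorem doormanAltGo_eq (s : List Char) (max_diff : Int) :
    ∀ i cur_diff total, doormanAltGo s max_diff i cur_diff total
      = total + doormanRec cur_diff (s.drop i) max_diff := by
  intro i cur_diff total
  induction i, cur_diff, total using doormanAltGo.induct s max_diff with
  | case1 i cd t hb =>
      rw [doormanAltGo, doormanRec.eq_def]
      simp only [if_pos hb]
      omega
  | case2 i cd t hb hi =>
      rw [doormanAltGo, doormanRec.eq_def, List.drop_eq_nil_of_le hi]
      simp [hb, hi]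
  | case3 i cd t hb hi hc ih =>
      have hi' : i < s.length := by omega
      rw [doormanAltGo]
      simp only [dite_eq_ite] at ih
      simp only [if_neg hb, if_neg hi, if_pos hc]
      rw [ih]
      conv_rhs => rw [List.drop_eq_getElem_cons hi', doormanRec.eq_def]
      rcases hdrop : s.drop (i + 1) with _ | ⟨d, rest⟩
      · rw [getElem!_pos s i hi']
        by_cases hw : s[i] = 'W' <;> simp [hw, hb] <;> ring_nf
      · have hi2 : i + 1 < s.length := by
          by_contra h
          rw [List.drop_eq_nil_of_le (by omega)] at hdrop
          cases hdrop
        have hd : d = s[i + 1] := by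
          have h2 := (List.drop_eq_getElem_cons hi2 (l := s)).symm.trans hdrop
          injection h2 with h21 h22
          exact h21.symm
        have heq : s[i] = s[i + 1] := by
          rcases hc with hlast | heq
          · omega
          · rwa [getElem!_pos s i hi', getElem!_pos s (i + 1) hi2] at heq
        have hcd : s[i] = d := by rw [hd, heq]
        subst hcd
        rw [getElem!_pos s i hi']
        by_cases hw : s[i] = 'W' <;> simp [hw, hb] <;> ring_nf
  | case4 i cd t hb hi hc ih =>
      push Not at hc
      obtain ⟨hne, hcc⟩ := hc
      have hi' : i < s.length := by omega
      have hi2 : i + 1 < s.length := by omega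
      rw [doormanAltGo]
      simp only [if_neg hb, if_neg hi]
      rw [if_neg (by push Not; exact ⟨hne, hcc⟩)]
      rw [ih]
      conv_rhs => rw [List.drop_eq_getElem_cons hi', List.drop_eq_getElem_cons hi2, doormanRec.eq_def]
      rw [getElem!_pos s i hi', getElem!_pos s (i + 1) hi2] at hcc
      simp [hb, hcc]
      ring_nf

-- ===== VERDICT (by name: the statement is the Claim_ definition above) =====
theorem doorman_spec : Claim_equal_doorman := by
  intro diff queue max_diff _
  unfold Spec_doorman doorman doorman_alt
  rw [doormanAltGo_eq]
  simp
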